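-- pv_equiv track=rewrite | github.com/TNychka/EPIJudge | epi_judge_python/nearest_repeated_entries.py | find_nearest_repetition
-- ===== SOURCE A (Python) =====
-- def find_nearest_repetition(paragraph):
--     table = dict()
--     minimum = len(paragraph) + 1
--     for index, word in enumerate(paragraph):
--         if word in table:
--             minimum = min(minimum, index - table[word])
--         table[word] = index
--     return -1 if minimum == len(paragraph) + 1 else minimum
-- ===== SOURCE B (Python) =====
-- def find_nearest_repetition(paragraph):
--     positions = {}
--     for i, w in enumerate(paragraph):
--         positions.setdefault(w, []).append(i)
--     best = None
--     for idxs in positions.values():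
--         for prev, cur in zip(idxs, idxs[1:]):
--             d = cur - prev
--             if best is None or d < best:
--                 best = d
--     return -1 if best is None else best
-- ===== Notes on version B (the rewrite author's own statement) =====
-- stated objective: alternative
-- what changed: Replaces A's single online pass keeping one last-seen index per word and a running minimum with a two-phase algorithm: first build a dict mapping each word to the full list of its occurrence indices, then scan each occurrence list's consecutive pairs for the smallest gap.
import Mathlib
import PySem

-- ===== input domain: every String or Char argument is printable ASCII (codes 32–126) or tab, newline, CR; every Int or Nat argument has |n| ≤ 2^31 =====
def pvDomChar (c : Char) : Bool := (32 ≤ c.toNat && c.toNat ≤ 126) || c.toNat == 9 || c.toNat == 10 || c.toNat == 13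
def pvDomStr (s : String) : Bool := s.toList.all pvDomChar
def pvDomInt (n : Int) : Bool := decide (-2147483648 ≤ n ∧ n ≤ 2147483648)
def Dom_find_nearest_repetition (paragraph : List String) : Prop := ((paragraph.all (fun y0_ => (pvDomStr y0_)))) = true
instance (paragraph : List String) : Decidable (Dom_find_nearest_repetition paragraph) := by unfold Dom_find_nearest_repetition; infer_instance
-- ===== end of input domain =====

-- B replaces A's online last-seen-index scan by a two-phase algorithm (occurrence lists, then
-- consecutive-gap scan); same O(n) cost, alternative structure.

-- ===== PORT A =====
def find_nearest_repetition (paragraph : List String) : Int :=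
  let st := (PySem.List.enumerate paragraph 0).foldl
    (fun (st : PySem.Dict String Int × Int) q =>
      (st.1.insert q.2 q.1,
       if st.1.contains q.2 then min st.2 (q.1 - st.1.getD q.2 0) else st.2))
    (PySem.Dict.empty, (paragraph.length : Int) + 1)
  if st.2 = (paragraph.length : Int) + 1 then -1 else st.2

-- ===== PORT B =====
-- inner loop of B's second pass: fold the consecutive gaps of one occurrence list into `best`
def nr_pairmin (best : Option Int) (idxs : List Int) : Option Int :=
  (idxs.zip (PySem.List.slice idxs (some 1) none)).foldl
    (fun b pr =>
      let d := pr.2 - pr.1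
      match b with
      | none => some d
      | some v => if d < v then some d else some v) best

def find_nearest_repetition_alt (paragraph : List String) : Int :=
  let positions := (PySem.List.enumerate paragraph 0).foldl
    (fun (d : PySem.Dict String (List Int)) q => d.modify q.2 [] (fun l => l ++ [q.1]))
    PySem.Dict.empty
  let best := positions.values.foldl nr_pairmin none
  match best with
  | none => -1
  | some v => v

-- ===== PRECONDITION & SPEC =====
def Spec_find_nearest_repetition (paragraph : List String) (out : Int) : Prop := out = find_nearest_repetition_alt paragraph
instance (paragraph : List String) (out : Int) : Decidable (Spec_find_nearest_repetition paragraph out) := by unfold Spec_find_nearest_repetition; infer_instance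

-- ===== CLAIM (what is proved, stated in full; the proofs are below) =====
def Claim_equal_find_nearest_repetition : Prop := ∀ (paragraph : List String), Dom_find_nearest_repetition paragraph → Spec_find_nearest_repetition paragraph (find_nearest_repetition paragraph)

-- ===== LEMMAS AND PROOFS =====

-- commutative-min on Option Int (none = "no gap seen yet"), the abstract shape of both loops
def ominO (a b : Option Int) : Option Int :=
  match a, b with
  | a, none => a
  | none, some d => some d
  | some v, some d => some (min v d)

-- minimal consecutive gap of one list, B's inner loop from an empty accumulator
def nrPer (l : List Int) : Option Int := nr_pairmin none l

-- B's second pass over a list of occurrence lists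
def nrF (vs : List (List Int)) : Option Int := vs.foldl nr_pairmin none

-- indices at which word w occurs in p
def nrOcc (p : List String) (w : String) : List Int :=
  ((PySem.List.enumerate p 0).filter (fun q => q.2 == w)).map (·.1)

-- A's running minimum as a function of the initial value and the optional best gap
def nrEnc (c : Int) (b : Option Int) : Int :=
  match b with
  | none => c
  | some v => min c v

-- the best gap of p in occurrence-list form
def nrBest (p : List String) : Option Int :=
  nrF ((PySem.Set.ofList p).map (fun w => nrOcc p w))

theorem ominO_none_left (b : Option Int) : ominO none b = b := by
  cases b <;> rfl

theorem ominO_assoc (a b c : Option Int) : ominO (ominO a b) c = ominO a (ominO b c) := by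
  cases a <;> cases b <;> cases c <;> simp [ominO, min_assoc]

theorem ominO_comm (a b : Option Int) : ominO a b = ominO b a := by
  cases a <;> cases b <;> simp [ominO, min_comm]

-- the pair-level step of B's inner loop is ominO with the gap
theorem nr_step_eq :
    (fun (b : Option Int) (pr : Int × Int) =>
      let d := pr.2 - pr.1
      match b with
      | none => some d
      | some v => if d < v then some d else some v) =
    (fun b pr => ominO b (some (pr.2 - pr.1))) := by
  funext b pr
  cases b with
  | none => rfl
  | some v => simp only [ominO]; split_ifs with h <;> simp <;> omega

theorem foldl_ominO_shift {α : Type} (h : α → Option Int) (xs : List α) (b : Option Int) :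
    xs.foldl (fun b x => ominO b (h x)) b = ominO b (xs.foldl (fun b x => ominO b (h x)) none) := by
  induction xs generalizing b with
  | nil => simp only [List.foldl_nil]; rfl
  | cons x t ih =>
    simp only [List.foldl]
    rw [ih (ominO b (h x)), ih (ominO none (h x)), ominO_none_left, ominO_assoc]

theorem nr_pairmin_eq (b : Option Int) (l : List Int) :
    nr_pairmin b l = ominO b (nrPer l) := by
  unfold nrPer nr_pairmin
  rw [nr_step_eq, foldl_ominO_shift (fun pr : Int × Int => some (pr.2 - pr.1)),
      foldl_ominO_shift (fun pr : Int × Int => some (pr.2 - pr.1)) _ none, ominO_none_left]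

theorem foldl_nr_pairmin_eq (vs : List (List Int)) (b : Option Int) :
    vs.foldl nr_pairmin b = ominO b (nrF vs) := by
  unfold nrF
  have he : nr_pairmin = fun b l => ominO b (nrPer l) := by
    funext b l; exact nr_pairmin_eq b l
  rw [he, foldl_ominO_shift nrPer, foldl_ominO_shift nrPer _ none, ominO_none_left]

theorem nrF_append (vs ws : List (List Int)) : nrF (vs ++ ws) = ominO (nrF vs) (nrF ws) := by
  unfold nrF
  rw [List.foldl_append, foldl_nr_pairmin_eq]
  rfl

theorem nrF_singleton (l : List Int) : nrF [l] = nrPer l := by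
  unfold nrF
  rw [List.foldl_cons, List.foldl_nil, nr_pairmin_eq, ominO_none_left]

theorem nrPer_singleton (y : Int) : nrPer [y] = none := rfl

-- consecutive pairs of l ++ [y]
theorem zip_tail_append_singleton :
    ∀ (l : List Int) (hl : l ≠ []) (y : Int),
      (l ++ [y]).zip (l ++ [y]).tail = l.zip l.tail ++ [(l.getLast hl, y)]
  | [], hl, y => absurd rfl hl
  | [a], _, y => rfl
  | a :: b :: t, _, y => by
    have ih := zip_tail_append_singleton (b :: t) (by simp) y
    simp only [List.cons_append, List.tail_cons, List.zip_cons_cons] at ih ⊢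
    rw [ih]
    simp [List.getLast]

theorem nrPer_append_singleton (l : List Int) (hl : l ≠ []) (y : Int) :
    nrPer (l ++ [y]) = ominO (nrPer l) (some (y - l.getLast hl)) := by
  unfold nrPer nr_pairmin
  rw [PySem.List.slice_from_one, PySem.List.slice_from_one,
      zip_tail_append_singleton l hl y, nr_step_eq, List.foldl_append,
      foldl_ominO_shift (fun pr : Int × Int => some (pr.2 - pr.1)) [(l.getLast hl, y)]]
  simp [List.foldl, ominO_none_left]

-- enumerate over an appended element
theorem enumerate_append_singleton {α : Type} (p : List α) (x : α) :
    ∀ s : Int, PySem.List.enumerate (p ++ [x]) s = PySem.List.enumerate p s ++ [(s + p.length, x)] := by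
  induction p with
  | nil => intro s; simp [PySem.List.enumerate_cons]
  | cons a t ih =>
    intro s
    simp only [List.cons_append, PySem.List.enumerate_cons, ih (s + 1), List.length_cons]
    have : s + 1 + (t.length : Int) = s + ((t.length : Int) + 1) := by ring
    push_cast
    rw [this]

theorem nrOcc_append_singleton (p : List String) (x : String) (w : String) :
    nrOcc (p ++ [x]) w = nrOcc p w ++ (if x = w then [(p.length : Int)] else []) := by
  unfold nrOcc
  rw [enumerate_append_singleton p x 0, List.filter_append, List.map_append]
  congr 1
  by_cases h : x = w
  · subst h
    simp [List.filter]
  · have hb : (x == w) = false := by simp [h]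
    simp [List.filter, hb, h]

theorem nrOcc_mem_bounds (p : List String) (w : String) (j : Int) (hj : j ∈ nrOcc p w) :
    0 ≤ j ∧ j < (p.length : Int) := by
  unfold nrOcc at hj
  have : j ∈ (PySem.List.enumerate p 0).map (·.1) := by
    rcases List.mem_map.mp hj with ⟨q, hq, rfl⟩
    exact List.mem_map.mpr ⟨q, (List.mem_filter.mp hq).1, rfl⟩
  rw [PySem.List.map_fst_enumerate] at this
  have := PySem.List.mem_pyRange_one.mp this
  omega

theorem nrOcc_ne_nil_iff (p : List String) (w : String) : nrOcc p w ≠ [] ↔ w ∈ p := by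
  unfold nrOcc
  constructor
  · intro h
    rcases List.exists_mem_of_ne_nil _ h with ⟨j, hj⟩
    rcases List.mem_map.mp hj with ⟨q, hq, _⟩
    rcases List.mem_filter.mp hq with ⟨hqm, hqw⟩
    have : q.2 ∈ p := by
      rw [← PySem.List.map_snd_enumerate p 0]
      exact List.mem_map.mpr ⟨q, hqm, rfl⟩
    have hq2 : q.2 = w := by simpa using hqw
    rwa [hq2] at this
  · intro h hnil
    rw [← PySem.List.map_snd_enumerate p 0] at h
    rcases List.mem_map.mp h with ⟨q, hq, rfl⟩
    have : q ∈ (PySem.List.enumerate p 0).filter (fun q' => q'.2 == q.2) :=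
      List.mem_filter.mpr ⟨hq, by simp⟩
    have : q.1 ∈ ((PySem.List.enumerate p 0).filter (fun q' => q'.2 == q.2)).map (·.1) :=
      List.mem_map.mpr ⟨q, this, rfl⟩
    rw [hnil] at this
    simp at this

-- changing one entry of the mapped family changes nrF by ominO with the new gap
theorem nrF_map_update (x : String) (d : Int) (f g : String → List Int) :
    ∀ s : List String, s.Nodup → x ∈ s →
      (∀ w ∈ s, w ≠ x → g w = f w) →
      nrPer (g x) = ominO (nrPer (f x)) (some d) →
      nrF (s.map g) = ominO (nrF (s.map f)) (some d) := by
  intro s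
  induction s with
  | nil => intro _ hx; simp at hx
  | cons a t ih =>
    intro hnd hx hfg hgx
    rcases List.mem_cons.mp hx with rfl | hxt
    · have ht : t.map g = t.map f := by
        apply List.map_congr_left
        intro w hw
        exact hfg w (List.mem_cons_of_mem _ hw) (fun h => (List.nodup_cons.mp hnd).1 (h ▸ hw))
      simp only [List.map_cons, nrF, List.foldl_cons, ht]
      rw [nr_pairmin_eq, ominO_none_left, foldl_nr_pairmin_eq, foldl_nr_pairmin_eq, hgx]
      rw [ominO_comm (nrPer (f x)) (some d), ominO_assoc, ominO_comm (some d)]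
      rfl
    · have ha : g a = f a := hfg a (by simp) (fun h => (List.nodup_cons.mp hnd).1 (h ▸ hxt))
      have := ih (List.nodup_cons.mp hnd).2 hxt (fun w hw => hfg w (List.mem_cons_of_mem _ hw)) hgx
      simp only [List.map_cons, nrF, List.foldl_cons, ha]
      rw [nr_pairmin_eq, ominO_none_left, foldl_nr_pairmin_eq, foldl_nr_pairmin_eq]
      show ominO (nrPer (f a)) (nrF (t.map g)) = ominO (ominO (nrPer (f a)) (nrF (t.map f))) (some d)
      rw [this, ominO_assoc]

-- any value nrF returns is one of the consecutive gaps of one of the lists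
theorem foldl_gap_mem (ps : List (Int × Int)) (v : Int)
    (h : ps.foldl (fun b pr => ominO b (some (pr.2 - pr.1))) none = some v) :
    ∃ pr ∈ ps, pr.2 - pr.1 = v := by
  induction ps using List.reverseRecOn with
  | nil => simp [List.foldl] at h
  | append_singleton t pr ih =>
    rw [List.foldl_append, foldl_ominO_shift (fun pr : Int × Int => some (pr.2 - pr.1)) [pr]] at h
    simp only [List.foldl] at h
    rw [ominO_none_left] at h
    cases ht : t.foldl (fun b pr => ominO b (some (pr.2 - pr.1))) none with
    | none => rw [ht] at h; simp only [ominO, Option.some.injEq] at h; exact ⟨pr, by simp, h⟩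
    | some u =>
      rw [ht] at h
      simp only [ominO, Option.some.injEq] at h
      rcases le_total u (pr.2 - pr.1) with hle | hle
      · rcases ih (by rw [ht]; congr 1; omega) with ⟨pr', h1, h2⟩
        exact ⟨pr', List.mem_append_left _ h1, by omega⟩
      · exact ⟨pr, List.mem_append_right _ (by simp), by omega⟩

theorem nrPer_gap (l : List Int) (v : Int) (h : nrPer l = some v) :
    ∃ pr ∈ l.zip l.tail, pr.2 - pr.1 = v := by
  unfold nrPer nr_pairmin at h
  rw [nr_step_eq, PySem.List.slice_from_one] at h
  exact foldl_gap_mem _ v h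

theorem nrF_mem (vs : List (List Int)) (v : Int) (h : nrF vs = some v) :
    ∃ l ∈ vs, nrPer l = some v := by
  induction vs using List.reverseRecOn with
  | nil => simp [nrF, List.foldl] at h
  | append_singleton t l ih =>
    rw [nrF_append, nrF_singleton] at h
    cases ht : nrF t with
    | none => rw [ht, ominO_none_left] at h; exact ⟨l, by simp, h⟩
    | some u =>
      rw [ht] at h
      cases hl : nrPer l with
      | none =>
        rw [hl] at h
        simp only [ominO, Option.some.injEq] at h
        rcases ih (by rw [ht, h]) with ⟨l', h1, h2⟩
        exact ⟨l', List.mem_append_left _ h1, h2⟩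
      | some dl =>
        rw [hl] at h
        simp only [ominO, Option.some.injEq] at h
        rcases le_total u dl with hle | hle
        · rcases ih (by rw [ht]; congr 1; omega) with ⟨l', h1, h2⟩
          exact ⟨l', List.mem_append_left _ h1, h2⟩
        · exact ⟨l, List.mem_append_right _ (by simp), by rw [hl]; congr 1; omega⟩

-- a best gap is bounded by the paragraph length
theorem nrBest_lt (p : List String) (v : Int) (h : nrBest p = some v) :
    v < (p.length : Int) := by
  rcases nrF_mem _ v h with ⟨l, hl, hper⟩
  rcases List.mem_map.mp hl with ⟨w, _, rfl⟩
  rcases nrPer_gap _ v hper with ⟨pr, hpr, rfl⟩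
  have h1 := (List.of_mem_zip hpr).1
  have h2 := List.tail_subset _ (List.of_mem_zip hpr).2
  have b1 := nrOcc_mem_bounds p w pr.1 h1
  have b2 := nrOcc_mem_bounds p w pr.2 h2
  omega

theorem nrEnc_ominO (c : Int) (b : Option Int) (d : Int) :
    nrEnc c (ominO b (some d)) = min (nrEnc c b) d := by
  cases b <;> simp [nrEnc, ominO, min_assoc]

-- B's port computes nrBest
theorem alt_eq_nrBest (p : List String) :
    find_nearest_repetition_alt p =
      (match nrBest p with | none => -1 | some v => v) := by
  unfold find_nearest_repetition_alt
  have hkeys : ((PySem.List.enumerate p 0).foldl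
      (fun (d : PySem.Dict String (List Int)) q => d.modify q.2 [] (fun l => l ++ [q.1]))
      PySem.Dict.empty).keys = PySem.Set.ofList p := by
    rw [PySem.Dict.keys_foldl_modify_key (PySem.List.enumerate p 0) (·.2) []
        (fun _ q => fun l => l ++ [q.1]) PySem.Dict.empty]
    rw [PySem.Dict.keys_empty, PySem.List.map_snd_enumerate, PySem.Set.ofList_eq_foldl]
    rfl
  have hnd : ((PySem.List.enumerate p 0).foldl
      (fun (d : PySem.Dict String (List Int)) q => d.modify q.2 [] (fun l => l ++ [q.1]))
      PySem.Dict.empty).keys.Nodup := by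
    exact PySem.Dict.nodup_keys_foldl_modify_key (PySem.List.enumerate p 0) (·.2) []
      (fun _ q => fun l => l ++ [q.1]) PySem.Dict.empty (by simp [PySem.Dict.keys_empty])
  have hgetD : ∀ w, ((PySem.List.enumerate p 0).foldl
      (fun (d : PySem.Dict String (List Int)) q => d.modify q.2 [] (fun l => l ++ [q.1]))
      PySem.Dict.empty).getD w [] = nrOcc p w := by
    intro w
    have hswap : (PySem.List.enumerate p 0).foldl
        (fun (d : PySem.Dict String (List Int)) q => d.modify q.2 [] (fun l => l ++ [q.1]))
        PySem.Dict.empty =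
        ((PySem.List.enumerate p 0).map Prod.swap).foldl
        (fun (d : PySem.Dict String (List Int)) r => d.modify r.1 [] (fun l => l ++ [r.2]))
        PySem.Dict.empty := by
      rw [List.foldl_map]
      simp only [Prod.fst_swap, Prod.snd_swap]
    rw [hswap, PySem.Dict.getD_foldl_modify_append, PySem.Dict.getD_empty, List.nil_append]
    unfold nrOcc
    rw [List.filter_map, List.map_map]
    rfl
  have hvals : ((PySem.List.enumerate p 0).foldl
      (fun (d : PySem.Dict String (List Int)) q => d.modify q.2 [] (fun l => l ++ [q.1]))
      PySem.Dict.empty).values = (PySem.Set.ofList p).map (fun w => nrOcc p w) := by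
    rw [PySem.Dict.values_eq_map_keys _ hnd [], hkeys]
    exact List.map_congr_left (fun w _ => hgetD w)
  simp only [hvals]
  rw [show ((PySem.Set.ofList p).map (fun w => nrOcc p w)).foldl nr_pairmin none = nrBest p from rfl]

-- A's fold state: table lookups agree with occurrence lists, minimum encodes the best gap
theorem a_state (p : List String) : ∀ c : Int,
    (∀ w, ((PySem.List.enumerate p 0).foldl
      (fun (st : PySem.Dict String Int × Int) q =>
        (st.1.insert q.2 q.1,
         if st.1.contains q.2 then min st.2 (q.1 - st.1.getD q.2 0) else st.2))
      (PySem.Dict.empty, c)).1.contains w = decide (w ∈ p)) ∧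
    (∀ w, ((PySem.List.enumerate p 0).foldl
      (fun (st : PySem.Dict String Int × Int) q =>
        (st.1.insert q.2 q.1,
         if st.1.contains q.2 then min st.2 (q.1 - st.1.getD q.2 0) else st.2))
      (PySem.Dict.empty, c)).1.getD w 0 = (nrOcc p w).getLast?.getD 0) ∧
    ((PySem.List.enumerate p 0).foldl
      (fun (st : PySem.Dict String Int × Int) q =>
        (st.1.insert q.2 q.1,
         if st.1.contains q.2 then min st.2 (q.1 - st.1.getD q.2 0) else st.2))
      (PySem.Dict.empty, c)).2 = nrEnc c (nrBest p) := by
  induction p using List.reverseRecOn with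
  | nil =>
    intro c
    refine ⟨fun w => by simp [PySem.Dict.contains_empty], fun w => by simp [PySem.Dict.getD_empty, nrOcc], ?_⟩
    simp [nrEnc, nrBest, nrF, PySem.Set.ofList_nil]
  | append_singleton t x ih =>
    intro c
    rcases ih c with ⟨ihc, ihg, ihm⟩
    rw [enumerate_append_singleton t x 0, List.foldl_append] at *
    set st := (PySem.List.enumerate t 0).foldl
      (fun (st : PySem.Dict String Int × Int) q =>
        (st.1.insert q.2 q.1,
         if st.1.contains q.2 then min st.2 (q.1 - st.1.getD q.2 0) else st.2))
      (PySem.Dict.empty, c) with hst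
    simp only [List.foldl_cons, List.foldl_nil, Int.zero_add]
    constructor
    · intro w
      rw [PySem.Dict.contains_insert, ihc]
      by_cases hw : w = x <;> simp [hw]
    · constructor
      · intro w
        rw [PySem.Dict.getD_insert, nrOcc_append_singleton]
        by_cases hw : w = x
        · subst hw; simp
        · have : ¬ (x = w) := fun h => hw h.symm
          simp [hw, this, ihg w]
      · -- the minimum component
        by_cases hx : x ∈ t
        · have hocc : nrOcc t x ≠ [] := (nrOcc_ne_nil_iff t x).mpr hx
          have hlast : (nrOcc t x).getLast?.getD 0 = (nrOcc t x).getLast hocc := by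
            rw [List.getLast?_eq_some_getLast hocc]; rfl
          have hcont : st.1.contains x = true := by rw [ihc]; simp [hx]
          have hbest : nrBest (t ++ [x]) =
              ominO (nrBest t) (some ((t.length : Int) - (nrOcc t x).getLast hocc)) := by
            unfold nrBest
            rw [PySem.Set.ofList_append_singleton,
                PySem.Set.add_of_mem (by rw [PySem.Set.mem_ofList]; exact hx)]
            exact nrF_map_update x _ (fun w => nrOcc t w) (fun w => nrOcc (t ++ [x]) w)
              (PySem.Set.ofList t) (PySem.Set.nodup_ofList t)
              (by rw [PySem.Set.mem_ofList]; exact hx)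
              (fun w _ hw => by
                show nrOcc (t ++ [x]) w = nrOcc t w
                rw [nrOcc_append_singleton, if_neg (fun h => hw h.symm)]
                simp)
              (by
                show nrPer (nrOcc (t ++ [x]) x) = _
                rw [nrOcc_append_singleton, if_pos rfl]
                exact nrPer_append_singleton (nrOcc t x) hocc _)
          simp only [hcont, if_true, ihm, ihg x, hlast, hbest, nrEnc_ominO]
        · have hocc : nrOcc t x = [] := by
            by_contra h; exact hx ((nrOcc_ne_nil_iff t x).mp h)
          have hcont : st.1.contains x = false := by rw [ihc]; simp [hx]
          have hbest : nrBest (t ++ [x]) = nrBest t := by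
            unfold nrBest
            rw [PySem.Set.ofList_append_singleton,
                PySem.Set.add_of_not_mem (by rw [PySem.Set.mem_ofList]; exact hx)]
            show nrF (((PySem.Set.ofList t : List String) ++ [x]).map fun w => nrOcc (t ++ [x]) w) = _
            rw [List.map_append, nrF_append]
            have h1 : (PySem.Set.ofList t : List String).map (fun w => nrOcc (t ++ [x]) w) =
                (PySem.Set.ofList t : List String).map (fun w => nrOcc t w) := by
              apply List.map_congr_left
              intro w hw
              have hwx : ¬ (x = w) := fun h => hx (by rw [h]; exact (PySem.Set.mem_ofList t w).mp hw)
              show nrOcc (t ++ [x]) w = nrOcc t w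
              rw [nrOcc_append_singleton, if_neg hwx]; simp
            have h2 : ([x] : List String).map (fun w => nrOcc (t ++ [x]) w) = [[(t.length : Int)]] := by
              simp [nrOcc_append_singleton, hocc]
            rw [h1, h2, nrF_singleton, nrPer_singleton]
            rfl
          simp [hcont, ihm, hbest]

-- ===== VERDICT (by name: the statement is the Claim_ definition above) =====
theorem find_nearest_repetition_spec : Claim_equal_find_nearest_repetition := by
  intro p _
  unfold Spec_find_nearest_repetition
  rw [alt_eq_nrBest]
  unfold find_nearest_repetition
  rcases a_state p ((p.length : Int) + 1) with ⟨-, -, hm⟩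
  simp only [hm]
  cases hb : nrBest p with
  | none => simp [nrEnc]
  | some v =>
    have hv : v < (p.length : Int) := nrBest_lt p v hb
    have hmin : min ((p.length : Int) + 1) v = v := by omega
    simp only [nrEnc, hmin]
    rw [if_neg (by omega)]
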